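-- pv_equiv track=rewrite | github.com/cabinrentalsofgeorgia-bit/Fortress-Prime | fortress-guest-platform/backend/scripts/legacy_spider.py | _segments_match
-- ===== SOURCE A (Python) =====
-- def _segments_match(path_parts: list[str], pat_parts: list[str]) -> bool:
--     pi = 0
--     for i, pat_seg in enumerate(pat_parts):
--         if pat_seg.startswith("[...") and pat_seg.endswith("]"):
--             return pi < len(path_parts)
--         if pat_seg.startswith("[[...") and pat_seg.endswith("]]"):
--             return True
--         if pat_seg.startswith("[") and pat_seg.endswith("]"):
--             if pi >= len(path_parts):
--                 return False
--             pi += 1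
--             continue
--         if pi >= len(path_parts) or path_parts[pi] != pat_seg:
--             return False
--         pi += 1
--     return pi == len(path_parts)
-- ===== SOURCE B (Python) =====
-- def _segments_match(path_parts: list[str], pat_parts: list[str]) -> bool:
--     cut = None
--     optional = False
--     for j, seg in enumerate(pat_parts):
--         if seg.startswith("[...") and seg.endswith("]"):
--             cut = j
--             break
--         if seg.startswith("[[...") and seg.endswith("]]"):
--             cut = j
--             optional = True
--             break
--     head = pat_parts if cut is None else pat_parts[:cut]
--     prefix_ok = len(path_parts) >= len(head) and all(
--         (seg.startswith("[") and seg.endswith("]")) or p == seg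
--         for p, seg in zip(path_parts, head)
--     )
--     if not prefix_ok:
--         return False
--     if cut is None:
--         return len(path_parts) == len(pat_parts)
--     return optional or cut < len(path_parts)
-- ===== Notes on version B (the rewrite author's own statement) =====
-- stated objective: alternative
-- what changed: Replaces A's single scan with a pi counter and in-loop early returns by a two-phase algorithm: first locate the first catch-all ([...]/[[...]]) segment of the pattern, then validate the literal/dynamic prefix zone with a zip+all comparison and decide the result from the split point and the path length.
import Mathlib
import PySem

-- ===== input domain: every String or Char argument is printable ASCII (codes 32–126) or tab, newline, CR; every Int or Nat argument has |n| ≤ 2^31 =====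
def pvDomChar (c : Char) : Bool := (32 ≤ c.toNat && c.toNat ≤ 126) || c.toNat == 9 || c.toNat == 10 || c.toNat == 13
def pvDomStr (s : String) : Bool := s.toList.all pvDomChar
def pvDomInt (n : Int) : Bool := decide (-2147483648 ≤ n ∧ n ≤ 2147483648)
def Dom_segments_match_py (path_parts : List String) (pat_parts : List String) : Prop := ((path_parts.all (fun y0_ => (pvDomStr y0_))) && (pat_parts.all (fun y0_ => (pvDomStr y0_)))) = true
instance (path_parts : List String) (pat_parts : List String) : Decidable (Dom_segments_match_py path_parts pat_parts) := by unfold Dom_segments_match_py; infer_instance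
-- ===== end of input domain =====

-- B replaces A's single indexed scan (pi counter into path_parts) by a two-phase algorithm: locate the first catch-all pattern segment, then check the prefix zone by zipping the two lists (objective: alternative decomposition, same cost).



-- ===== PORT A =====
-- loop over pat_parts with enumerate and a pi counter; early returns become result values
def segmentsGoA (path_parts : List String) : List String → Nat → Bool
  | [], pi => pi == path_parts.length
  | pat_seg :: rest, pi =>
    if PySem.Str.startswith pat_seg "[..." && PySem.Str.endswith pat_seg "]" then
      decide (pi < path_parts.length)
    else if PySem.Str.startswith pat_seg "[[..." && PySem.Str.endswith pat_seg "]]" then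
      true
    else if PySem.Str.startswith pat_seg "[" && PySem.Str.endswith pat_seg "]" then
      if path_parts.length ≤ pi then false
      else segmentsGoA path_parts rest (pi + 1)
    else if path_parts.length ≤ pi || !(PySem.List.pyGet? path_parts (pi : Int) == some pat_seg) then
      false
    else segmentsGoA path_parts rest (pi + 1)

def segments_match_py (path_parts : List String) (pat_parts : List String) : Bool :=
  segmentsGoA path_parts pat_parts 0

-- ===== PORT B =====
-- B: find the first catch-all in the pattern, then compare the prefix zone with zip/all
def altFind : List String → Nat → Option (Nat × Bool)
  | [], _ => none
  | seg :: rest, j =>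
    if PySem.Str.startswith seg "[..." && PySem.Str.endswith seg "]" then
      some (j, false)
    else if PySem.Str.startswith seg "[[..." && PySem.Str.endswith seg "]]" then
      some (j, true)
    else altFind rest (j + 1)

def altPrefixOk (path_parts : List String) (head : List String) : Bool :=
  decide (head.length ≤ path_parts.length) &&
    (path_parts.zip head).all (fun pr =>
      (PySem.Str.startswith pr.2 "[" && PySem.Str.endswith pr.2 "]") || pr.1 == pr.2)

def segments_match_py_alt (path_parts : List String) (pat_parts : List String) : Bool :=
  match altFind pat_parts 0 with
  | none =>
    if !altPrefixOk path_parts pat_parts then false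
    else path_parts.length == pat_parts.length
  | some (j, opt) =>
    if !altPrefixOk path_parts (pat_parts.take j) then false
    else opt || decide (j < path_parts.length)

-- ===== PRECONDITION & SPEC =====
def Spec_segments_match_py (path_parts : List String) (pat_parts : List String) (out : Bool) : Prop := out = segments_match_py_alt path_parts pat_parts
instance (path_parts : List String) (pat_parts : List String) (out : Bool) : Decidable (Spec_segments_match_py path_parts pat_parts out) := by unfold Spec_segments_match_py; infer_instance

-- ===== CLAIM (what is proved, stated in full; the proofs are below) =====
def Claim_equal_segments_match_py : Prop := ∀ (path_parts : List String) (pat_parts : List String), Dom_segments_match_py path_parts pat_parts → Spec_segments_match_py path_parts pat_parts (segments_match_py path_parts pat_parts)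

-- ===== LEMMAS AND PROOFS =====

-- ===== VERDICT (by name: the statement is the Claim_ definition above) =====
theorem altFind_shift (l : List String) : ∀ j : Nat, altFind l j = (altFind l 0).map (fun pr => (pr.1 + j, pr.2)) := by
  induction l with
  | nil => intro j; simp [altFind]
  | cons seg rest ih =>
    intro j
    rw [altFind, altFind]
    split_ifs with h1 h2
    · simp
    · simp
    · rw [ih (j + 1), ih 1]
      cases altFind rest 0 with
      | none => simp
      | some pr => simp; omega

theorem altPrefixOk_nil_head (p : List String) : altPrefixOk p [] = true := by
  simp [altPrefixOk]

theorem altPrefixOk_cons (q : String) (pt : List String) (seg : String) (h : List String) :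
    altPrefixOk (q :: pt) (seg :: h) =
      (((PySem.Str.startswith seg "[" && PySem.Str.endswith seg "]") || q == seg) && altPrefixOk pt h) := by
  simp only [altPrefixOk, List.zip_cons_cons, List.all_cons, List.length_cons,
    Nat.add_le_add_iff_right]
  rw [Bool.and_left_comm]

theorem alt_nil (p : List String) : segments_match_py_alt p [] = p.isEmpty := by
  unfold segments_match_py_alt
  simp only [altFind, altPrefixOk_nil_head]
  cases p <;> simp

theorem alt_cons_main (q : String) (pt : List String) (head : String) (pats : List String)
    (h1 : (PySem.Str.startswith head "[..." && PySem.Str.endswith head "]") = false)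
    (h2 : (PySem.Str.startswith head "[[..." && PySem.Str.endswith head "]]") = false) :
    segments_match_py_alt (q :: pt) (head :: pats) =
      (((PySem.Str.startswith head "[" && PySem.Str.endswith head "]") || q == head) &&
        segments_match_py_alt pt pats) := by
  unfold segments_match_py_alt
  have hf : altFind (head :: pats) 0 = (altFind pats 0).map (fun pr => (pr.1 + 1, pr.2)) := by
    rw [altFind, if_neg (by rw [h1]; simp), if_neg (by rw [h2]; simp)]
    exact altFind_shift pats 1
  rw [hf]
  cases hfa : altFind pats 0 with
  | none =>
    simp only [Option.map_none]
    by_cases hg : ((PySem.Str.startswith head "[" && PySem.Str.endswith head "]") || q == head) = true <;>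
      by_cases hp : altPrefixOk pt pats = true <;>
        simp [altPrefixOk_cons, hp] <;> rfl
  | some pr =>
    obtain ⟨jj, opt⟩ := pr
    simp only [Option.map_some, List.take_succ_cons]
    by_cases hg : ((PySem.Str.startswith head "[" && PySem.Str.endswith head "]") || q == head) = true <;>
      by_cases hp : altPrefixOk pt (List.take jj pats) = true <;>
        simp [altPrefixOk_cons, hp] <;> rfl

theorem alt_cons_empty (head : String) (pats : List String)
    (h1 : (PySem.Str.startswith head "[..." && PySem.Str.endswith head "]") = false)
    (h2 : (PySem.Str.startswith head "[[..." && PySem.Str.endswith head "]]") = false) :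
    segments_match_py_alt [] (head :: pats) = false := by
  unfold segments_match_py_alt
  have hf : altFind (head :: pats) 0 = (altFind pats 0).map (fun pr => (pr.1 + 1, pr.2)) := by
    rw [altFind, if_neg (by rw [h1]; simp), if_neg (by rw [h2]; simp)]
    exact altFind_shift pats 1
  rw [hf]
  cases hfa : altFind pats 0 with
  | none => simp [altPrefixOk]
  | some pr => obtain ⟨jj, opt⟩ := pr; simp [altPrefixOk]

theorem alt_cons (p : List String) (head : String) (pats : List String) :
    segments_match_py_alt p (head :: pats) =
      (if PySem.Str.startswith head "[..." && PySem.Str.endswith head "]" then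
        !p.isEmpty
      else if PySem.Str.startswith head "[[..." && PySem.Str.endswith head "]]" then
        true
      else if PySem.Str.startswith head "[" && PySem.Str.endswith head "]" then
        match p with
        | [] => false
        | _ :: pt => segments_match_py_alt pt pats
      else
        match p with
        | [] => false
        | q :: pt => q == head && segments_match_py_alt pt pats) := by
  by_cases h1 : (PySem.Str.startswith head "[..." && PySem.Str.endswith head "]") = true
  · rw [if_pos h1]
    unfold segments_match_py_alt
    have hf : altFind (head :: pats) 0 = some (0, false) := by rw [altFind, if_pos h1]
    rw [hf]
    simp only [List.take_zero, altPrefixOk_nil_head]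
    cases p <;> simp
  · by_cases h2 : (PySem.Str.startswith head "[[..." && PySem.Str.endswith head "]]") = true
    · rw [if_neg h1, if_pos h2]
      unfold segments_match_py_alt
      have hf : altFind (head :: pats) 0 = some (0, true) := by rw [altFind, if_neg h1, if_pos h2]
      rw [hf]
      simp only [List.take_zero, altPrefixOk_nil_head]
      simp
    · rw [if_neg h1, if_neg h2]
      have h1' := Bool.not_eq_true _ ▸ h1
      have h2' := Bool.not_eq_true _ ▸ h2
      cases p with
      | nil =>
        rw [alt_cons_empty head pats (Bool.not_eq_true _ ▸ h1') (Bool.not_eq_true _ ▸ h2')]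
        split_ifs <;> rfl
      | cons q pt =>
        rw [alt_cons_main q pt head pats (by simpa using h1) (by simpa using h2)]
        by_cases h3 : (PySem.Str.startswith head "[" && PySem.Str.endswith head "]") = true
        · rw [if_pos h3, h3, Bool.true_or, Bool.true_and]
        · have h3' : (PySem.Str.startswith head "[" && PySem.Str.endswith head "]") = false := by
            simpa using h3
          rw [if_neg h3, h3', Bool.false_or]

theorem goA_eq_alt (pat_parts : List String) : ∀ (path_parts : List String) (pi : Nat), pi ≤ path_parts.length →
    segmentsGoA path_parts pat_parts pi = segments_match_py_alt (path_parts.drop pi) pat_parts := by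
  induction pat_parts with
  | nil =>
    intro path pi h
    rw [segmentsGoA, alt_nil]
    rcases Nat.lt_or_ge pi path.length with hlt | hge
    · have e1 : (pi == path.length) = false := by
        simpa using Nat.ne_of_lt hlt
      have e2 : (List.drop pi path).isEmpty = false := by
        rw [List.drop_eq_getElem_cons hlt]; rfl
      rw [e1, e2]
    · have hpi : pi = path.length := Nat.le_antisymm h hge
      simp [hpi, List.drop_length]
  | cons head rest ih =>
    intro path pi h
    rw [segmentsGoA, alt_cons]
    rcases Nat.lt_or_ge pi path.length with hlt | hge
    · have hd : path.drop pi = path[pi] :: path.drop (pi + 1) := List.drop_eq_getElem_cons hlt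
      have hget : PySem.List.pyGet? path (pi : Int) = some path[pi] := by
        simp [PySem.List.pyGet?_natCast, List.getElem?_eq_getElem hlt]
      rw [hd]
      split_ifs with h1 h2 h3 h4
      · simp [hlt]
      · rfl
      · exact absurd h4 (Nat.not_le.mpr hlt)
      · show segmentsGoA path rest (pi + 1) = segments_match_py_alt (List.drop (pi + 1) path) rest
        exact ih path (pi + 1) hlt
      · rename_i h5
        have hne : (path[pi] == head) = false := by
          simp [hget, Nat.not_le.mpr hlt] at h5
          simpa using h5
        show false = (path[pi] == head && segments_match_py_alt (List.drop (pi + 1) path) rest)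
        rw [hne, Bool.false_and]
      · rename_i h5
        have heq : (path[pi] == head) = true := by
          simp [hget, Nat.not_le.mpr hlt] at h5
          simpa using h5
        show segmentsGoA path rest (pi + 1) = (path[pi] == head && segments_match_py_alt (List.drop (pi + 1) path) rest)
        rw [heq, Bool.true_and]
        exact ih path (pi + 1) hlt
    · have hd : path.drop pi = [] := List.drop_eq_nil_iff.mpr hge
      rw [hd]
      split_ifs with h1 h2 h3 h4
      · simp [Nat.not_lt.mpr hge]
      · rfl
      · rfl
      · rfl
      · simp [hge] at h4

theorem segments_match_py_spec : Claim_equal_segments_match_py := by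
  intro path pats _
  unfold Spec_segments_match_py segments_match_py
  simpa using goA_eq_alt pats path 0 (Nat.zero_le _)
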